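-- pv_equiv track=rewrite | github.com/Her-dev/algoritmos-y-programacion-1 | Guia/serie6/ej6_3.py | espacio_caracter_max
-- ===== SOURCE A (Python) =====
-- def espacio_caracter_max(cadena,separador,maxim):
-- 	"""Dada una cadena, un separador y una cantidad máxima, inserta el caracter
-- 	entre los espacios. No insertará más del máximo"""
-- 	cadena_final = ""
-- 	contador = 0
--
-- 	for e in cadena:
--
-- 		if e == " " and contador < maxim:
-- 			cadena_final += separador
-- 			contador += 1
-- 			continue
--
-- 		cadena_final += e
--
-- 	return cadena_final
-- ===== SOURCE B (Python) =====
-- def espacio_caracter_max(cadena, separador, maxim):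
--     """Dada una cadena, un separador y una cantidad maxima, inserta el caracter
--     entre los espacios. No insertara mas del maximo"""
--     return cadena.replace(" ", separador, max(maxim, 0))
-- ===== Notes on version B (the rewrite author's own statement) =====
-- stated objective: idiomatic
-- what changed: The hand-written character loop with a replacement counter is replaced by a single str.replace call with a count (max(maxim,0), so a negative maxim replaces nothing, as in A).
import Mathlib
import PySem

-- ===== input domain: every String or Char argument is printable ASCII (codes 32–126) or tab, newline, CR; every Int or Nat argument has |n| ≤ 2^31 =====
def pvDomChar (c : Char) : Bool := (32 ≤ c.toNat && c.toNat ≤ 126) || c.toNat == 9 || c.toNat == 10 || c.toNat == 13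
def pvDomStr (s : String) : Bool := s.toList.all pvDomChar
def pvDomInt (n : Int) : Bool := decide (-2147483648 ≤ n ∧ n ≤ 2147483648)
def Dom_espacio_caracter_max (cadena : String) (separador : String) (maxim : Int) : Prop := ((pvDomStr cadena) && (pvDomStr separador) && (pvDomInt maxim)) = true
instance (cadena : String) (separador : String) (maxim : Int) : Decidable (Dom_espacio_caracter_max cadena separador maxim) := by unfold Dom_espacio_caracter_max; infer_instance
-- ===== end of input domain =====

-- B replaces A's counting character loop by one bounded str.replace call (idiomatic; same return value).

-- ===== PORT A =====
-- A: fold over the characters keeping (cadena_final, contador); a space with contador < maxim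
-- appends separador and bumps contador, anything else appends the character itself.
def espacio_caracter_max (cadena : String) (separador : String) (maxim : Int) : String :=
  (cadena.toList.foldl
    (fun (st : String × Int) e =>
      if e = ' ' ∧ st.2 < maxim then (st.1 ++ separador, st.2 + 1)
      else (st.1 ++ String.ofList [e], st.2))
    ("", 0)).1

-- ===== PORT B =====
-- Source B: cadena.replace(" ", separador, max(maxim, 0)).  PySem has no counted replace, so the
-- builtin is ported by hand, exact for a one-character pattern: replace the first n spaces.
def pvReplaceSpaceN (sep : List Char) : Nat → List Char → List Char
  | _, [] => []
  | n, c :: cs =>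
      if c = ' ' ∧ 0 < n then sep ++ pvReplaceSpaceN sep (n - 1) cs
      else c :: pvReplaceSpaceN sep n cs

def espacio_caracter_max_alt (cadena : String) (separador : String) (maxim : Int) : String :=
  String.ofList (pvReplaceSpaceN separador.toList (max maxim 0).toNat cadena.toList)

-- ===== PRECONDITION & SPEC =====
def Spec_espacio_caracter_max (cadena : String) (separador : String) (maxim : Int) (out : String) : Prop := out = espacio_caracter_max_alt cadena separador maxim
instance (cadena : String) (separador : String) (maxim : Int) (out : String) : Decidable (Spec_espacio_caracter_max cadena separador maxim out) := by unfold Spec_espacio_caracter_max; infer_instance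

-- ===== CLAIM (what is proved, stated in full; the proofs are below) =====
def Claim_equal_espacio_caracter_max : Prop := ∀ (cadena : String) (separador : String) (maxim : Int), Dom_espacio_caracter_max cadena separador maxim → Spec_espacio_caracter_max cadena separador maxim (espacio_caracter_max cadena separador maxim)

-- ===== LEMMAS AND PROOFS =====

theorem pv_mk_append (a b : List Char) : String.ofList a ++ String.ofList b = String.ofList (a ++ b) := String.ofList_append.symm

-- Loop invariant: with accumulator String.ofList acc and counter k, A's fold produces
-- acc followed by B's replacement of the first (maxim - k) spaces of the rest.
theorem pv_loop_eq (sep : String) (maxim : Int) :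
    ∀ (cs : List Char) (acc : List Char) (k : Int),
      (cs.foldl
        (fun (st : String × Int) e =>
          if e = ' ' ∧ st.2 < maxim then (st.1 ++ sep, st.2 + 1)
          else (st.1 ++ String.ofList [e], st.2))
        (String.ofList acc, k)).1
      = String.ofList (acc ++ pvReplaceSpaceN sep.toList (maxim - k).toNat cs) := by
  intro cs
  induction cs with
  | nil => intro acc k; simp [pvReplaceSpaceN]
  | cons c cs ih =>
    intro acc k
    by_cases h : c = ' ' ∧ k < maxim
    · have hsep : String.ofList acc ++ sep = String.ofList (acc ++ sep.toList) := by
        rw [String.ofList_append, String.ofList_toList]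
      have hn : (maxim - (k + 1)).toNat = (maxim - k).toNat - 1 := by omega
      have hpos : 0 < (maxim - k).toNat := by omega
      simp only [List.foldl_cons, if_pos h, hsep, ih]
      rw [pvReplaceSpaceN, if_pos ⟨h.1, hpos⟩, hn, List.append_assoc]
    · have hne : ¬ (c = ' ' ∧ 0 < (maxim - k).toNat) := by
        rintro ⟨hc, hp⟩; exact h ⟨hc, by omega⟩
      simp only [List.foldl_cons, if_neg h, pv_mk_append, ih]
      rw [pvReplaceSpaceN, if_neg hne, List.append_assoc]
      simp

-- ===== VERDICT (by name: the statement is the Claim_ definition above) =====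
theorem espacio_caracter_max_spec : Claim_equal_espacio_caracter_max := by
  intro cadena separador maxim _
  show espacio_caracter_max cadena separador maxim = espacio_caracter_max_alt cadena separador maxim
  unfold espacio_caracter_max espacio_caracter_max_alt
  have h := pv_loop_eq separador maxim cadena.toList [] 0
  have hmax : (maxim - 0).toNat = (max maxim 0).toNat := by omega
  rw [hmax] at h
  simpa using h
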